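-- pv_equiv track=rewrite | github.com/satyop7/CertiMint-Engine | AI_analysis_engine/groq_keywords.py | get_fallback_keywords
-- ===== SOURCE A (Python) =====
-- def get_fallback_keywords(subject):
--     """Generate fallback keywords based on subject name"""
--     # Simple fallback: use the subject words and some generic academic terms
--     words = subject.lower().split()
--     keywords = [w for w in words if len(w) > 3]
--
--     # Add some generic academic terms
--     generic_terms = ["theory", "concept", "analysis", "research",
--                     "methodology", "framework", "application", "study",
--                     "development", "principles", "fundamentals", "practice"]
--
--     # Combine subject words with generic terms
--     while len(keywords) < 8:
--         if generic_terms: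
--             keywords.append(generic_terms.pop(0))
--         else:
--             # If we run out of generic terms, duplicate existing keywords
--             keywords.append(keywords[0] if keywords else "topic")
--
--     return keywords[:8]  # Return exactly 8 keywords
-- ===== SOURCE B (Python) =====
-- def get_fallback_keywords(subject):
--     """Generate fallback keywords based on subject name"""
--     keywords = [w for w in subject.lower().split() if len(w) > 3]
--     generic_terms = ["theory", "concept", "analysis", "research",
--                     "methodology", "framework", "application", "study",
--                     "development", "principles", "fundamentals", "practice"]
--     return (keywords + generic_terms)[:8]
-- ===== Notes on version B (the rewrite author's own statement) =====
-- stated objective: simpler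
-- what changed: Replaces the mutating while-loop (which pops generic terms one at a time and carries an unreachable duplicate/'topic' branch) with a single concatenation of the filtered subject words and the generic-terms list followed by one slice [:8].
import Mathlib
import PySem

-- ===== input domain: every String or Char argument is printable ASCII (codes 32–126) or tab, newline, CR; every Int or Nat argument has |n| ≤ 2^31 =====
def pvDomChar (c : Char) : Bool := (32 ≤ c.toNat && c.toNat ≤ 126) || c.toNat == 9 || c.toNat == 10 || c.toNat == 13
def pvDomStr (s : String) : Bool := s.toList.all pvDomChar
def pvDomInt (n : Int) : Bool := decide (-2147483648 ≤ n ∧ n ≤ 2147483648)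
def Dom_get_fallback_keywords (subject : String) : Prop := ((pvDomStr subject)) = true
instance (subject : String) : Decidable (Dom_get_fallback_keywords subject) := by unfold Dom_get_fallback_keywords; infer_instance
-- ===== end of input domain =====

-- B replaces A's generic-popping while loop (with its unreachable duplicate branch) by one
-- concatenation and slice; objective: simpler.

-- ===== PORT A =====
-- the while-loop of A: state is (keywords, generic_terms); the else-branch ports
-- 'keywords.append(keywords[0] if keywords else "topic")'
def pvFillLoop (keywords : List String) (generics : List String) : List String :=
  if keywords.length < 8 then
    match generics with
    | g :: rest => pvFillLoop (keywords ++ [g]) rest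
    | [] =>
        pvFillLoop (keywords ++ [match keywords with | [] => "topic" | k :: _ => k]) []
  else keywords
termination_by 8 - keywords.length
decreasing_by all_goals simp_all; omega

def get_fallback_keywords (subject : String) : List String :=
  let words := PySem.Str.split₀ (PySem.Str.lower subject)
  let keywords := words.filter (fun w => 3 < PySem.Str.len w)
  let generic_terms := ["theory", "concept", "analysis", "research",
    "methodology", "framework", "application", "study",
    "development", "principles", "fundamentals", "practice"]
  (pvFillLoop keywords generic_terms).take 8

-- ===== PORT B =====
def get_fallback_keywords_alt (subject : String) : List String :=
  let keywords := (PySem.Str.split₀ (PySem.Str.lower subject)).filter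
    (fun w => 3 < PySem.Str.len w)
  let generic_terms := ["theory", "concept", "analysis", "research",
    "methodology", "framework", "application", "study",
    "development", "principles", "fundamentals", "practice"]
  (keywords ++ generic_terms).take 8

-- ===== PRECONDITION & SPEC =====
def Spec_get_fallback_keywords (subject : String) (out : List String) : Prop := out = get_fallback_keywords_alt subject
instance (subject : String) (out : List String) : Decidable (Spec_get_fallback_keywords subject out) := by unfold Spec_get_fallback_keywords; infer_instance

-- ===== CLAIM (what is proved, stated in full; the proofs are below) =====
def Claim_equal_get_fallback_keywords : Prop := ∀ (subject : String), Dom_get_fallback_keywords subject → Spec_get_fallback_keywords subject (get_fallback_keywords subject)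

-- ===== LEMMAS AND PROOFS =====

-- the loop only ever appends generics while fewer than 8 keywords are present, so as long as
-- enough generics remain its result, cut at 8, is the concatenation cut at 8
theorem pvFillLoop_take (generics : List String) :
    ∀ keywords : List String, 8 ≤ keywords.length + generics.length →
      (pvFillLoop keywords generics).take 8 = (keywords ++ generics).take 8 := by
  induction generics with
  | nil =>
      intro kw h
      rw [pvFillLoop.eq_def]
      simp at h
      simp [Nat.not_lt.mpr h]
  | cons g rest ih =>
      intro kw h
      rw [pvFillLoop.eq_def]
      by_cases hlt : kw.length < 8
      · simp only [if_pos hlt]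
        rw [ih (kw ++ [g]) (by simp at h ⊢; omega)]
        simp
      · simp only [if_neg hlt]
        rw [List.take_append_of_le_length (by omega)]

-- ===== VERDICT (by name: the statement is the Claim_ definition above) =====
theorem get_fallback_keywords_spec : Claim_equal_get_fallback_keywords := by
  intro subject _
  unfold Spec_get_fallback_keywords get_fallback_keywords get_fallback_keywords_alt
  exact pvFillLoop_take _ _ (by simp)
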